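-- pv_equiv track=rewrite | github.com/Hulyamr13/hackerrank | Palindromes.py | relabel
-- ===== SOURCE A (Python) =====
-- def relabel(s):
--     mapping = {}
--     ret = ''
--     for x in s:
--         if x not in mapping:
--             mapping[x] = chr(ord('a') + len(mapping))
--         ret += mapping[x]
--     return ret
-- ===== SOURCE B (Python) =====
-- def relabel(s):
--     labels = {c: chr(ord('a') + len(set(s[:s.index(c)]))) for c in set(s)}
--     return ''.join(labels[c] for c in s)
-- ===== Notes on version B (the rewrite author's own statement) =====
-- stated objective: alternative
-- what changed: B replaces A's single pass that threads a growing mapping dict through the loop by a per-character closed form: the label of c is determined independently as the number of distinct characters in the prefix of s before c's first occurrence (len(set(s[:s.index(c)]))), computed once per distinct character and then applied in a translate pass.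
import Mathlib
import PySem

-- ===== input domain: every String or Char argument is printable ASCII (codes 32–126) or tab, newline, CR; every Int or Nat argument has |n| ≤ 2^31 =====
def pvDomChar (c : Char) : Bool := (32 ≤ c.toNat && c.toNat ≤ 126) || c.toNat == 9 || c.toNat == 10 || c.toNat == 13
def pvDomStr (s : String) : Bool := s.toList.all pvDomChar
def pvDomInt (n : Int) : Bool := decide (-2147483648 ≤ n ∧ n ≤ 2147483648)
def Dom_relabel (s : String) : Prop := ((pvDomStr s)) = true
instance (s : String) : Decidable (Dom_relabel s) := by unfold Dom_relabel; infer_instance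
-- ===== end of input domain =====

-- B computes each character's label by a closed form — the number of distinct characters in the
-- prefix of s before that character's first occurrence — once per distinct character, then
-- translates; A threads a growing mapping through one pass. Objective: alternative.

-- ===== PORT A =====
-- one loop iteration of A: maybe extend the mapping, then append mapping[x]
-- (mapping[x] is always present after the branch, so getD's default ' ' is never used)
def relabelStep (st : PySem.Dict Char Char × List Char) (x : Char) :
    PySem.Dict Char Char × List Char :=
  let m := if !(st.1.contains x) then st.1.insert x (Char.ofNat ('a'.toNat + st.1.size))
           else st.1
  (m, st.2 ++ [m.getD x ' '])

def relabel (s : String) : String :=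
  String.ofList (s.toList.foldl relabelStep (PySem.Dict.empty, [])).2

-- ===== PORT B =====
-- the label of c: chr(ord('a') + len(set(s[:s.index(c)])))  (c always occurs in s here)
def relabelLabel (l : List Char) (c : Char) : Char :=
  Char.ofNat ('a'.toNat + (PySem.Set.ofList
    (PySem.List.slice l none (some (((PySem.List.index? l c).getD 0 : Nat) : Int)))).length)

def relabel_alt (s : String) : String :=
  let l := s.toList
  -- labels = {c: chr(ord('a') + len(set(s[:s.index(c)]))) for c in set(s)}
  let labels : PySem.Dict Char Char :=
    (PySem.Set.ofList l).foldl (fun d c => d.insert c (relabelLabel l c)) PySem.Dict.empty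
  -- ''.join(labels[c] for c in s)  (labels[c] is always present, so getD's default is never used)
  String.ofList (l.map (fun c => labels.getD c ' '))

-- ===== PRECONDITION & SPEC =====
def Spec_relabel (s : String) (out : String) : Prop := out = relabel_alt s
instance (s : String) (out : String) : Decidable (Spec_relabel s out) := by unfold Spec_relabel; infer_instance

-- ===== CLAIM (what is proved, stated in full; the proofs are below) =====
def Claim_equal_relabel : Prop := ∀ (s : String), Dom_relabel s → Spec_relabel s (relabel s)

-- ===== LEMMAS AND PROOFS =====

-- A's fold: the mapping's keys are the distinct chars in order, its values are letters by
-- first-appearance rank, and the output labels each char by its rank in the dedup list.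
theorem relabel_fold_inv (l : List Char) :
    (l.foldl relabelStep (PySem.Dict.empty, [])).1.keys = PySem.Set.ofList l ∧
    (∀ c, (l.foldl relabelStep (PySem.Dict.empty, [])).1.get? c =
      (PySem.List.index? (PySem.Set.ofList l) c).map (fun i => Char.ofNat ('a'.toNat + i))) ∧
    (l.foldl relabelStep (PySem.Dict.empty, [])).2 =
      l.map (fun c => Char.ofNat ('a'.toNat + ((PySem.List.index? (PySem.Set.ofList l) c).getD 0))) := by
  induction l using List.reverseRecOn with
  | nil =>
      refine ⟨rfl, fun c => ?_, rfl⟩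
      simp [PySem.Dict.get?_empty, PySem.Set.ofList_nil, PySem.List.index?_eq_idxOf?]
  | append_singleton l x ih =>
      obtain ⟨hkeys, hget, hret⟩ := ih
      rw [List.foldl_append]
      simp only [List.foldl_cons, List.foldl_nil]
      set st := l.foldl relabelStep (PySem.Dict.empty, []) with hst
      have hcont : st.1.contains x = decide (x ∈ PySem.Set.ofList l) := by
        rw [PySem.Dict.contains_eq_decide_mem_keys, hkeys]
      by_cases hx : x ∈ PySem.Set.ofList l
      · -- x already seen: dict unchanged, dedup unchanged
        have hofL : PySem.Set.ofList (l ++ [x]) = PySem.Set.ofList l := by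
          rw [PySem.Set.ofList_append_singleton, PySem.Set.add_of_mem hx]
        have hstep : relabelStep st x = (st.1, st.2 ++ [st.1.getD x ' ']) := by
          simp [relabelStep, hcont, hx]
        rw [hstep, hofL]
        refine ⟨hkeys, hget, ?_⟩
        simp only [List.map_append, List.map_cons, List.map_nil, ← hret]
        congr 1
        rw [PySem.Dict.getD_eq_get?_getD, hget x]
        obtain ⟨i, hi⟩ := Option.isSome_iff_exists.mp ((PySem.List.index?_isSome_iff _ _).mpr hx)
        rw [hi]
        simp
      · -- x new: appended to dict and to dedup
        have hofL : PySem.Set.ofList (l ++ [x]) = PySem.Set.ofList l ++ [x] := by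
          rw [PySem.Set.ofList_append_singleton, PySem.Set.add_of_not_mem hx]
        have hsize : st.1.size = (PySem.Set.ofList l).length := by
          have : st.1.keys.length = st.1.size := by
            simp [PySem.Dict.keys, PySem.Dict.size]
          rw [← this, hkeys]
        have hstep : relabelStep st x =
            (st.1.insert x (Char.ofNat ('a'.toNat + st.1.size)),
             st.2 ++ [(st.1.insert x (Char.ofNat ('a'.toNat + st.1.size))).getD x ' ']) := by
          simp [relabelStep, hcont, hx]
        have hncont : st.1.contains x = false := by simp [hcont, hx]
        rw [hstep, hofL]
        refine ⟨?_, fun c => ?_, ?_⟩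
        · rw [PySem.Dict.keys_insert_of_not_contains _ _ hncont, hkeys]
        · rw [PySem.Dict.get?_insert]
          by_cases hcx : c = x
          · subst hcx
            rw [PySem.List.index?_append_singleton_self _ _ hx, if_pos rfl]
            simp [hsize]
          · rw [if_neg hcx, hget c]
            by_cases hcl : c ∈ PySem.Set.ofList l
            · rw [PySem.List.index?_append_of_mem _ hcl]
            · have h1 : PySem.List.index? (PySem.Set.ofList l) c = none :=
                (PySem.List.index?_eq_none_iff _ _).mpr hcl
              have h2 : PySem.List.index? (PySem.Set.ofList l ++ [x]) c = none := by
                rw [PySem.List.index?_eq_none_iff _ _]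
                simp [hcl, hcx]
              rw [h1, h2]
        · simp only [List.map_append, List.map_cons, List.map_nil]
          congr 1
          · rw [hret]
            refine List.map_congr_left (fun c hc => ?_)
            have hcl : c ∈ PySem.Set.ofList l := (PySem.Set.mem_ofList _ _).mpr hc
            rw [PySem.List.index?_append_of_mem _ hcl]
          · rw [PySem.Dict.getD_eq_get?_getD, PySem.Dict.get?_insert_self,
              PySem.List.index?_append_singleton_self _ _ hx]
            simp [hsize]

-- B's dict comprehension: looking up any key of ks yields f of that key
theorem get?_foldl_insert_fun (f : Char → Char) (ks : List Char) (d : PySem.Dict Char Char)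
    (c : Char) :
    (ks.foldl (fun d k => d.insert k (f k)) d).get? c =
      if c ∈ ks then some (f c) else d.get? c := by
  induction ks generalizing d with
  | nil => simp
  | cons k ks ih =>
      simp only [List.foldl_cons, ih, List.mem_cons]
      by_cases hc : c ∈ ks
      · simp [hc]
      · by_cases hck : c = k
        · subst hck; simp [hc, PySem.Dict.get?_insert_self]
        · simp [hc, hck, PySem.Dict.get?_insert]

-- the rank of c in the first-appearance dedup list equals the number of distinct chars
-- in the prefix of l before c's first occurrence
theorem index?_ofList_eq_prefix_card (l : List Char) (c : Char) (hc : c ∈ l) :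
    PySem.List.index? (PySem.Set.ofList l) c =
      some (PySem.Set.ofList (l.take ((PySem.List.index? l c).getD 0))).length := by
  induction l using List.reverseRecOn with
  | nil => cases hc
  | append_singleton l x ih =>
      by_cases hcl : c ∈ l
      · -- c occurs in l: its first occurrence, its prefix and its rank are unchanged
        obtain ⟨j, hj⟩ := Option.isSome_iff_exists.mp ((PySem.List.index?_isSome_iff _ _).mpr hcl)
        obtain ⟨hjlt, -, -⟩ := PySem.List.getElem_of_index?_eq_some hj
        have hidx : PySem.List.index? (l ++ [x]) c = some j := by
          rw [PySem.List.index?_append_of_mem _ hcl, hj]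
        have htake : (l ++ [x]).take j = l.take j :=
          List.take_append_of_le_length (le_of_lt hjlt)
        have ih' := ih hcl
        rw [hj, Option.getD_some] at ih'
        rw [hidx, Option.getD_some, htake]
        by_cases hx : x ∈ PySem.Set.ofList l
        · rw [PySem.Set.ofList_append_singleton, PySem.Set.add_of_mem hx, ih']
        · rw [PySem.Set.ofList_append_singleton, PySem.Set.add_of_not_mem hx,
            PySem.List.index?_append_of_mem _ ((PySem.Set.mem_ofList _ _).mpr hcl),
            ih']
      · -- c = x is new: rank = |set(l)|, and the prefix before it is l itself
        have hcx : c = x := by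
          rcases List.mem_append.mp hc with h | h
          · exact absurd h hcl
          · simpa using h
        subst hcx
        have hxs : c ∉ PySem.Set.ofList l := fun h => hcl ((PySem.Set.mem_ofList _ _).mp h)
        rw [PySem.Set.ofList_append_singleton, PySem.Set.add_of_not_mem hxs,
          PySem.List.index?_append_singleton_self _ _ hcl,
          PySem.List.index?_append_singleton_self _ _ hxs]
        simp

-- ===== VERDICT (by name: the statement is the Claim_ definition above) =====
theorem relabel_spec : Claim_equal_relabel := by
  intro s _
  unfold Spec_relabel relabel relabel_alt
  have hA := (relabel_fold_inv s.toList).2.2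
  rw [hA]
  congr 1
  refine List.map_congr_left (fun c hc => ?_)
  rw [PySem.Dict.getD_eq_get?_getD,
    get?_foldl_insert_fun (relabelLabel s.toList) _ _ c,
    if_pos ((PySem.Set.mem_ofList _ _).mpr hc)]
  rw [index?_ofList_eq_prefix_card s.toList c hc]
  simp [relabelLabel, PySem.List.slice_to_natCast]
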